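-- pv_equiv track=rewrite | github.com/kieuvinhh/CS112.L12.KHCL | test_dia_lan/code.py | solution
-- ===== SOURCE A (Python) =====
-- def solution(n,k,a):
--     count_one = [0] * 12
--     x = k
--     check = False
--     for i in a[:k]:
--         for bit in range(12):
--             if (1 << bit) & i:
--                 count_one[bit] += 1
--             if count_one[bit] == k:
--                 check = True
--     if check == False:
--         return "YES"
--     while x < n:
--         check = False
--         l,r = x - k, x
--         for bit in range(12):
--             if (1 << bit) & a[l]:
--                 count_one[bit] -= 1
--             if (1 << bit) & a[r]:
--                 count_one[bit] += 1
--             if count_one[bit] == k: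
--                 check = True
--         if check == False:
--             return "YES"
--         x += 1
--
--     return "NO"
-- ===== SOURCE B (Python) =====
-- def _full_column(w, k):
--     # a window has a fully-set bit column iff it has exactly k >= 1 elements
--     # and the bitwise AND of its elements (within 12 bits) is nonzero
--     if len(w) != k or k <= 0:
--         return False
--     m = 0xFFF
--     for x in w:
--         m &= x
--     return m != 0
--
-- def solution(n, k, a):
--     if not _full_column(a[:k], k):
--         return "YES"
--     for start in range(1, n - k + 1):
--         if not _full_column(a[start:start + k], k):
--             return "YES"
--     return "NO"
-- ===== Notes on version B (the rewrite author's own statement) =====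
-- stated objective: simpler
-- what changed: A maintains 12 per-bit sliding counters plus a check flag carried across windows; B treats every window independently, reducing the slice a[start:start+k] with a single bitwise AND under a 12-bit mask and declaring a full column iff the AND is nonzero.
-- outside the precondition, e.g. on solution(3, 2, [1, 0]): A returns 'YES', B returns 'YES'
import Mathlib
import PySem

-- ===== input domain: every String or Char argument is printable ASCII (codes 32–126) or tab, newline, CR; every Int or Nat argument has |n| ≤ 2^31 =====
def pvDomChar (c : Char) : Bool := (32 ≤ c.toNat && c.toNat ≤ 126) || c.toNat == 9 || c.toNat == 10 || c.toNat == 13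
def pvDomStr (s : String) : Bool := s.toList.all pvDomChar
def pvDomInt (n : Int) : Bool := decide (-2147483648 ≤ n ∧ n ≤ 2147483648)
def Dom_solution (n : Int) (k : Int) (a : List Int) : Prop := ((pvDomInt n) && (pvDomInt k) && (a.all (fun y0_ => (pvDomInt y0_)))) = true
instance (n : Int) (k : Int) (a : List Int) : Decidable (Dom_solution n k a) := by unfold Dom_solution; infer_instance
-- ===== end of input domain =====

-- B replaces A's sliding per-bit counters by an independent bitwise-AND test of each window (simpler).

-- ===== PORT A =====
def stepA (k : Int) (st : List Int × Bool) (i : Int) : List Int × Bool :=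
  (List.range 12).foldl (fun (st : List Int × Bool) (bit : Nat) =>
    let c := if PySem.Int.band ((1:Int) <<< bit) i ≠ 0 then st.1.set bit (st.1.getD bit 0 + 1) else st.1
    (c, if c.getD bit 0 == k then true else st.2)) st

def slideA (k d r : Int) (st : List Int × Bool) (bit : Nat) : List Int × Bool :=
  let c1 := if PySem.Int.band ((1:Int) <<< bit) d ≠ 0 then st.1.set bit (st.1.getD bit 0 - 1) else st.1
  let c2 := if PySem.Int.band ((1:Int) <<< bit) r ≠ 0 then c1.set bit (c1.getD bit 0 + 1) else c1
  (c2, if c2.getD bit 0 == k then true else st.2)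

def loopA (n k : Int) (a : List Int) : Nat → Int → List Int → String
  | 0, _, _ => "NO"
  | fuel+1, x, count =>
    if x < n then
      let st := (List.range 12).foldl
        (slideA k (PySem.List.pyGetD a (x - k) 0) (PySem.List.pyGetD a x 0)) (count, false)
      if st.2 = false then "YES" else loopA n k a fuel (x + 1) st.1
    else "NO"

def solution (n : Int) (k : Int) (a : List Int) : String :=
  let st := (PySem.List.slice a none (some k)).foldl (stepA k) (List.replicate 12 (0:Int), false)
  if st.2 = false then "YES" else loopA n k a (n - k).toNat k st.1

-- ===== PORT B =====
def bAnd12 (w : List Int) : Int := w.foldl PySem.Int.band 0xFFF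

def bFullColumn (w : List Int) (k : Int) : Bool :=
  if PySem.List.len w ≠ k ∨ k ≤ 0 then false else decide (bAnd12 w ≠ 0)

def loopB (k : Int) (a : List Int) : List Int → String
  | [] => "NO"
  | s :: rest =>
    if bFullColumn (PySem.List.slice a (some s) (some (s + k))) k then loopB k a rest else "YES"

def solution_alt (n : Int) (k : Int) (a : List Int) : String :=
  if bFullColumn (PySem.List.slice a none (some k)) k then
    loopB k a (PySem.List.pyRange 1 (n - k + 1) 1)
  else "YES"

-- ===== PRECONDITION & SPEC =====
-- Pre_ excludes only the malformed inputs with n > len(a) (n is declared as the length of a) whose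
-- sliding phase can actually be entered (0 < k ≤ len(a)): there A raises IndexError whenever every
-- window it scans has a fully-set column, and returns "YES" otherwise; with k ≤ 0 or k > len(a) the
-- sliding phase is unreachable and A returns for every n, so those inputs stay inside Pre_.
def Pre_solution (n : Int) (k : Int) (a : List Int) : Prop :=
  n ≤ (a.length : Int) ∨ k ≤ 0 ∨ (a.length : Int) < k
instance (n : Int) (k : Int) (a : List Int) : Decidable (Pre_solution n k a) := by unfold Pre_solution; infer_instance

def pvWitness_solution : Int × Int × List Int := (2, 2, [1, 3])

def Spec_solution (n : Int) (k : Int) (a : List Int) (out : String) : Prop := out = solution_alt n k a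
instance (n : Int) (k : Int) (a : List Int) (out : String) : Decidable (Spec_solution n k a out) := by unfold Spec_solution; infer_instance

-- ===== CLAIM (what is proved, stated in full; the proofs are below) =====
def Claim_equal_solution : Prop := ∀ (n : Int) (k : Int) (a : List Int), Dom_solution n k a → Pre_solution n k a → Spec_solution n k a (solution n k a)

-- ===== LEMMAS AND PROOFS =====

-- count of the elements of w whose bit b is set (Python's infinite two's complement)
def wcnt (w : List Int) (b : Nat) : Nat := w.countP (fun x => x.testBit b)

theorem ldiff_eq_sub (m n : Nat) : m.ldiff n = m - (m &&& n) := by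
  induction m using Nat.binaryRec generalizing n with
  | zero => simp [Nat.ldiff]
  | bit a m ih =>
    cases n using Nat.bitCasesOn with
    | bit b n' =>
      rw [Nat.ldiff_bit, Nat.land_bit]
      have h1 := ih n'
      have h2 : m &&& n' ≤ m := Nat.and_le_left
      simp only [Nat.bit_val]
      cases a <;> cases b <;> simp_all <;> omega

theorem band_eq_land (a b : Int) : PySem.Int.band a b = Int.land a b := by
  rcases a with m | m <;> rcases b with n | n <;>
    simp [PySem.Int.band, Int.land, Int.negSucc_eq, ldiff_eq_sub] <;> omega

theorem testBit_band (a b : Int) (i : Nat) :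
    (PySem.Int.band a b).testBit i = (a.testBit i && b.testBit i) := by
  rw [band_eq_land]; exact Int.testBit_land a b i

theorem bitset_iff (b : Nat) (x : Int) : (PySem.Int.band ((1:Int) <<< b) x ≠ 0) ↔ x.testBit b = true := by
  have hs : (1:Int) <<< b = ((2^b : Nat) : Int) := by rw [Int.shiftLeft_eq]; push_cast; ring
  rw [hs, band_eq_land]
  rcases x with m | m
  · show (Int.land (Int.ofNat (2^b)) (Int.ofNat m) ≠ 0) ↔ m.testBit b = true
    have : Int.land (Int.ofNat (2^b)) (Int.ofNat m) = Int.ofNat (2^b &&& m) := rfl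
    rw [this]
    have h2 : 2^b &&& m = (m.testBit b).toNat * 2^b := by
      rw [Nat.land_comm]; exact Nat.and_two_pow m b
    rw [h2]
    cases h : m.testBit b <;> simp
  · show (Int.land (Int.ofNat (2^b)) (Int.negSucc m) ≠ 0) ↔ (!m.testBit b) = true
    have : Int.land (Int.ofNat (2^b)) (Int.negSucc m) = Int.ofNat ((2^b).ldiff m) := rfl
    rw [this]
    have h2 : (2^b).ldiff m = if m.testBit b then 0 else 2^b := by
      apply Nat.eq_of_testBit_eq
      intro i
      by_cases hib : b = i
      · subst hib; cases h : m.testBit b <;> simp [Nat.testBit_ldiff, h]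
      · cases h : m.testBit b <;> simp [Nat.testBit_ldiff, Nat.testBit_two_pow, hib, h]
    rw [h2]
    cases h : m.testBit b <;> simp

theorem foldl_band_testBit (w : List Int) (M : Int) (i : Nat) :
    (w.foldl PySem.Int.band M).testBit i = (M.testBit i && w.all (fun x => x.testBit i)) := by
  induction w generalizing M with
  | nil => simp
  | cons x t ih => simp [List.foldl_cons, ih, testBit_band, Bool.and_assoc]

theorem foldl_band_nonneg (w : List Int) (M : Int) (h : 0 ≤ M) : 0 ≤ w.foldl PySem.Int.band M := by
  induction w generalizing M with
  | nil => simpa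
  | cons x t ih => exact ih _ (PySem.Int.band_nonneg_of_nonneg_left x h)

theorem bAnd12_ne_zero (w : List Int) :
    bAnd12 w ≠ 0 ↔ ∃ b, b < 12 ∧ ∀ x ∈ w, x.testBit b = true := by
  have hmask : ∀ b : Nat, (0xFFF : Int).testBit b = decide (b < 12) := by
    intro b
    show (Int.ofNat 4095).testBit b = decide (b < 12)
    have : (Int.ofNat 4095).testBit b = (4095 : Nat).testBit b := rfl
    rw [this]
    have h4095 : (4095 : Nat) = 2^12 - 1 := by norm_num
    rw [h4095, Nat.testBit_two_pow_sub_one]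
  constructor
  · intro hne
    have hnn : 0 ≤ bAnd12 w := foldl_band_nonneg w _ (by norm_num)
    obtain ⟨m, hm⟩ : ∃ m : Nat, bAnd12 w = Int.ofNat m :=
      ⟨(bAnd12 w).toNat, by rw [Int.ofNat_eq_natCast, Int.toNat_of_nonneg hnn]⟩
    have hm0 : m ≠ 0 := by rintro rfl; exact hne (by rw [hm]; rfl)
    obtain ⟨b, hb⟩ := Nat.exists_testBit_of_ne_zero hm0
    have htb : (bAnd12 w).testBit b = true := by rw [hm]; exact hb
    rw [show bAnd12 w = w.foldl PySem.Int.band 0xFFF from rfl, foldl_band_testBit, hmask] at htb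
    simp only [Bool.and_eq_true, decide_eq_true_eq, List.all_eq_true] at htb
    exact ⟨b, htb.1, htb.2⟩
  · rintro ⟨b, hb12, hall⟩
    intro h0
    have : (bAnd12 w).testBit b = true := by
      rw [show bAnd12 w = w.foldl PySem.Int.band 0xFFF from rfl, foldl_band_testBit, hmask]
      simp only [Bool.and_eq_true, decide_eq_true_eq, List.all_eq_true]
      exact ⟨hb12, hall⟩
    rw [h0] at this
    exact absurd this (by show Nat.testBit 0 b ≠ true; simp)

theorem getD_set_eq (l : List Int) (i j : Nat) (v d : Int) :
    (l.set i v).getD j d = if j = i ∧ i < l.length then v else l.getD j d := by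
  simp only [List.getD, List.getElem?_set]
  split_ifs <;> simp_all

theorem set_getD_self (l : List Int) (i : Nat) (hi : i < l.length) (d : Int) :
    l.set i (l.getD i d) = l := by
  simp [List.getD, List.getElem?_eq_getElem hi]

theorem getDq_set (c : List Int) (bit : Nat) (hb : bit < c.length) (v : Int) :
    (c.set bit v)[bit]?.getD 0 = v := by
  have h := getD_set_eq c bit bit v 0
  simp only [List.getD] at h
  rw [h]; simp [hb]

theorem set_getDq_self (l : List Int) (bit : Nat) (hb : bit < l.length) :
    l.set bit (l[bit]?.getD 0) = l := by
  have := set_getD_self l bit hb 0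
  simpa [List.getD] using this

theorem innerFoldSpec (f : (List Int × Bool) → Nat → (List Int × Bool)) (g : Nat → Int → Int) (k : Int)
    (hf : ∀ (c : List Int) (chk : Bool) (bit : Nat), bit < 12 → c.length = 12 →
      f (c, chk) bit = (c.set bit (g bit (c.getD bit 0)),
                        if g bit (c.getD bit 0) == k then true else chk)) :
    ∀ (m : Nat), m ≤ 12 → ∀ (c : List Int) (chk : Bool), c.length = 12 →
      ((List.range m).foldl f (c, chk)).1.length = 12 ∧
      (∀ b : Nat, ((List.range m).foldl f (c, chk)).1.getD b 0 =
        if b < m then g b (c.getD b 0) else c.getD b 0) ∧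
      (((List.range m).foldl f (c, chk)).2 = true ↔
        (chk = true ∨ ∃ b, b < m ∧ g b (c.getD b 0) = k)) := by
  intro m
  induction m with
  | zero => intro _ c chk hl; simp [hl]
  | succ m ih =>
    intro hm c chk hl
    obtain ⟨ih1, ih2, ih3⟩ := ih (by omega) c chk hl
    set prev := (List.range m).foldl f (c, chk) with hprev
    have hstep : (List.range (m+1)).foldl f (c, chk) = f prev m := by
      rw [List.range_succ, List.foldl_append, List.foldl_cons, List.foldl_nil]
    have heta : f prev m = f (prev.1, prev.2) m := rfl
    have hfm := hf prev.1 prev.2 m (by omega) ih1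
    rw [hstep, heta, hfm]
    have hgm : prev.1.getD m 0 = c.getD m 0 := by rw [ih2]; simp
    refine ⟨by simpa using ih1, ?_, ?_⟩
    · intro b
      rw [getD_set_eq, hgm, ih2]
      by_cases hbm : b = m
      · subst hbm
        rw [if_pos ⟨rfl, by rw [ih1]; omega⟩, if_pos (by omega)]
      · by_cases hbm' : b < m <;> simp [hbm, hbm'] <;> omega
    · rw [hgm]
      by_cases hk : g m (c.getD m 0) = k
      · simp only [hk, beq_self_eq_true, if_true, true_iff]
        right; exact ⟨m, by omega, hk⟩
      · have : (g m (c.getD m 0) == k) = false := by simpa using hk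
        rw [this, if_neg (by simp)]
        rw [ih3]
        constructor
        · rintro (h | ⟨b, hb, hgb⟩)
          · exact Or.inl h
          · exact Or.inr ⟨b, by omega, hgb⟩
        · rintro (h | ⟨b, hb, hgb⟩)
          · exact Or.inl h
          · right
            refine ⟨b, ?_, hgb⟩
            rcases Nat.lt_succ_iff_lt_or_eq.mp hb with h' | rfl
            · exact h'
            · exact absurd hgb hk

theorem stepA_hf (k i : Int) :
    ∀ (c : List Int) (chk : Bool) (bit : Nat), bit < 12 → c.length = 12 →
      (fun (st : List Int × Bool) (bit : Nat) =>
        let c := if PySem.Int.band ((1:Int) <<< bit) i ≠ 0 then st.1.set bit (st.1.getD bit 0 + 1) else st.1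
        (c, if c.getD bit 0 == k then true else st.2)) (c, chk) bit =
      (c.set bit (c.getD bit 0 + (if PySem.Int.band ((1:Int) <<< bit) i ≠ 0 then 1 else 0)),
       if (c.getD bit 0 + (if PySem.Int.band ((1:Int) <<< bit) i ≠ 0 then 1 else 0)) == k then true else chk) := by
  intro c chk bit hb hl
  by_cases h : PySem.Int.band ((1:Int) <<< bit) i = 0
  · simp [h, List.getD, set_getDq_self c bit (by omega)]
  · simp [h, List.getD, getDq_set c bit (by omega)]

theorem slideA_hf (k d r : Int) :
    ∀ (c : List Int) (chk : Bool) (bit : Nat), bit < 12 → c.length = 12 →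
      slideA k d r (c, chk) bit =
      (c.set bit ((c.getD bit 0 - (if PySem.Int.band ((1:Int) <<< bit) d ≠ 0 then 1 else 0))
                  + (if PySem.Int.band ((1:Int) <<< bit) r ≠ 0 then 1 else 0)),
       if ((c.getD bit 0 - (if PySem.Int.band ((1:Int) <<< bit) d ≠ 0 then 1 else 0))
                  + (if PySem.Int.band ((1:Int) <<< bit) r ≠ 0 then 1 else 0)) == k then true else chk) := by
  intro c chk bit hb hl
  unfold slideA
  have hset := getDq_set c bit (by omega)
  have hsets : ∀ v : Int, (c.set bit v).length = 12 := by simp [hl]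
  by_cases hd : PySem.Int.band ((1:Int) <<< bit) d = 0 <;>
    by_cases hr : PySem.Int.band ((1:Int) <<< bit) r = 0
  · simp [hd, hr, List.getD, set_getDq_self c bit (by omega)]
  · simp [hd, hr, List.getD, getDq_set c bit (by omega)]
  · simp [hd, hr, List.getD, getDq_set c bit (by omega)]
  · have h2 : ∀ v w : Int, ((c.set bit v).set bit w)[bit]?.getD 0 = w := fun v w => by
      rw [List.set_set]; exact getDq_set c bit (by omega) w
    simp [hd, hr, List.getD, List.set_set, getDq_set c bit (by omega)]

theorem wcnt_le (w : List Int) (b : Nat) : wcnt w b ≤ w.length := List.countP_le_length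

theorem wcnt_append (w : List Int) (x : Int) (b : Nat) :
    wcnt (w ++ [x]) b = wcnt w b + (if x.testBit b then 1 else 0) := by
  simp [wcnt, List.countP_append, List.countP_cons]

theorem wcnt_cons (x : Int) (w : List Int) (b : Nat) :
    wcnt (x :: w) b = (if x.testBit b then 1 else 0) + wcnt w b := by
  by_cases h : x.testBit b <;> simp [wcnt, List.countP_cons, h] <;> omega

theorem ind_eq (x : Int) (b : Nat) :
    (if PySem.Int.band ((1:Int) <<< b) x ≠ 0 then (1:Int) else 0) = (if x.testBit b then 1 else 0) := by
  by_cases h : x.testBit b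
  · rw [if_pos ((bitset_iff b x).mpr h), if_pos h]
  · rw [if_neg (fun hc => h ((bitset_iff b x).mp hc)), if_neg h]

theorem firstFold (k : Int) (hk : 1 ≤ k) (w : List Int) (hw : (w.length : Int) ≤ k) :
    (w.foldl (stepA k) (List.replicate 12 (0:Int), false)).1.length = 12 ∧
    (∀ b, b < 12 → (w.foldl (stepA k) (List.replicate 12 (0:Int), false)).1.getD b 0 = (wcnt w b : Int)) ∧
    ((w.foldl (stepA k) (List.replicate 12 (0:Int), false)).2 = true ↔
      ∃ b, b < 12 ∧ (wcnt w b : Int) = k) := by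
  induction w using List.reverseRecOn with
  | nil =>
    refine ⟨by simp, ?_, ?_⟩
    · intro b hb
      simp only [List.foldl_nil, wcnt, List.countP_nil, Nat.cast_zero, List.getD, List.getElem?_replicate]
      split_ifs; rfl
    · simp only [List.foldl_nil]
      constructor
      · intro h; exact absurd h (by simp)
      · rintro ⟨b, -, h0⟩
        simp [wcnt] at h0
        omega
  | append_singleton w x ih =>
    have hw' : (w.length : Int) ≤ k := by simp at hw ⊢; omega
    obtain ⟨p1, p2, p3⟩ := ih hw'
    set prev := w.foldl (stepA k) (List.replicate 12 (0:Int), false) with hprev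
    rw [List.foldl_append, List.foldl_cons, List.foldl_nil]
    have heta : stepA k prev x = (List.range 12).foldl
        (fun (st : List Int × Bool) (bit : Nat) =>
          let c := if PySem.Int.band ((1:Int) <<< bit) x ≠ 0 then st.1.set bit (st.1.getD bit 0 + 1) else st.1
          (c, if c.getD bit 0 == k then true else st.2)) (prev.1, prev.2) := rfl
    obtain ⟨q1, q2, q3⟩ := innerFoldSpec (fun (st : List Int × Bool) (bit : Nat) =>
        let c := if PySem.Int.band ((1:Int) <<< bit) x ≠ 0 then st.1.set bit (st.1.getD bit 0 + 1) else st.1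
        (c, if c.getD bit 0 == k then true else st.2))
      (fun bit v => v + (if PySem.Int.band ((1:Int) <<< bit) x ≠ 0 then 1 else 0)) k
      (stepA_hf k x) 12 le_rfl prev.1 prev.2 p1
    rw [heta]
    have hg : ∀ b, b < 12 →
        prev.1.getD b 0 + (if PySem.Int.band ((1:Int) <<< b) x ≠ 0 then (1:Int) else 0)
          = (wcnt (w ++ [x]) b : Int) := by
      intro b hb
      rw [p2 b hb, ind_eq, wcnt_append]
      push_cast
      by_cases h : x.testBit b <;> simp [h]
    refine ⟨q1, ?_, ?_⟩
    · intro b hb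
      rw [q2 b, if_pos hb]
      exact hg b hb
    · rw [q3]
      constructor
      · rintro (h | ⟨b, hb, hgb⟩)
        · obtain ⟨b, hb, hcb⟩ := p3.mp h
          refine ⟨b, hb, ?_⟩
          have h1 := wcnt_le (w ++ [x]) b
          have h2 : wcnt w b ≤ wcnt (w ++ [x]) b := by rw [wcnt_append]; omega
          have h3 : (w ++ [x]).length = w.length + 1 := by simp
          simp at hw
          omega
        · exact ⟨b, hb, by rw [← hgb, hg b hb]⟩
      · rintro ⟨b, hb, hcb⟩
        right
        exact ⟨b, hb, by rw [hg b hb]; exact hcb⟩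

theorem firstFold_neg (k : Int) (hk : k < 0) (w : List Int) :
    ∀ (c : List Int), c.length = 12 → (∀ b, 0 ≤ c.getD b 0) →
      (w.foldl (stepA k) (c, false)).2 = false := by
  induction w with
  | nil => intro c _ _; simp
  | cons x t ih =>
    intro c hl hpos
    rw [List.foldl_cons]
    obtain ⟨q1, q2, q3⟩ := innerFoldSpec (fun (st : List Int × Bool) (bit : Nat) =>
        let c := if PySem.Int.band ((1:Int) <<< bit) x ≠ 0 then st.1.set bit (st.1.getD bit 0 + 1) else st.1
        (c, if c.getD bit 0 == k then true else st.2))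
      (fun bit v => v + (if PySem.Int.band ((1:Int) <<< bit) x ≠ 0 then 1 else 0)) k
      (stepA_hf k x) 12 le_rfl c false hl
    have hflag : (stepA k (c, false) x).2 = false := by
      show ((List.range 12).foldl _ (c, false)).2 = false
      rcases hq : ((List.range 12).foldl _ (c, false)).2 with _ | _
      · rfl
      · exfalso
        obtain (h | ⟨b, _, hgb⟩) := q3.mp hq
        · simp at h
        · have := hpos b
          split_ifs at hgb <;> omega
    have hpair : stepA k (c, false) x = ((stepA k (c, false) x).1, false) := by
      conv_lhs => rw [(Prod.mk.eta (p := stepA k (c, false) x)).symm]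
      rw [hflag]
    rw [hpair]
    apply ih
    · exact q1
    · intro b
      have hq2 := q2 b
      show ((List.range 12).foldl _ (c, false)).1.getD b 0 ≥ 0
      rw [hq2]
      have := hpos b
      split_ifs <;> omega

theorem bFullColumn_iff (w : List Int) (k : Int) (hk : 1 ≤ k) (hw : (w.length : Int) = k) :
    bFullColumn w k = true ↔ ∃ b, b < 12 ∧ (wcnt w b : Int) = k := by
  unfold bFullColumn
  rw [if_neg (by simp [PySem.List.len_eq, hw]; omega)]
  rw [decide_eq_true_eq]
  rw [bAnd12_ne_zero]
  constructor
  · rintro ⟨b, hb, hall⟩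
    refine ⟨b, hb, ?_⟩
    have : wcnt w b = w.length := List.countP_eq_length.mpr (by intro x hx; simpa using hall x hx)
    rw [this, hw]
  · rintro ⟨b, hb, hcb⟩
    refine ⟨b, hb, ?_⟩
    have : wcnt w b = w.length := by omega
    intro x hx
    have := List.countP_eq_length.mp this x hx
    simpa using this

theorem loops (n k : Int) (a : List Int) (hk : 1 ≤ k) (hn : n ≤ (a.length : Int)) :
    ∀ (fuel : Nat) (x : Int) (count : List Int), k ≤ x → x ≤ (a.length : Int) →
      fuel = (n - x).toNat → count.length = 12 →
      (∀ b, b < 12 → count.getD b 0 = (wcnt ((a.drop (x - k).toNat).take k.toNat) b : Int)) →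
      loopA n k a fuel x count = loopB k a (PySem.List.pyRange (x - k + 1) (n - k + 1) 1) := by
  intro fuel
  induction fuel with
  | zero =>
    intro x count hkx hxlen hfuel _ _
    have hnx : n ≤ x := by omega
    rw [PySem.List.pyRange_one_eq_nil (by omega)]
    rfl
  | succ fuel ih =>
    intro x count hkx hxlen hfuel hlen hcnt
    have hxn : x < n := by omega
    have hxlt : x.toNat < a.length := by omega
    have hslt : (x - k).toNat < a.length := by omega
    set s : Nat := (x - k).toNat with hs
    set K : Nat := k.toNat with hK
    have hKpos : 1 ≤ K := by omega
    have hsK : s + K = x.toNat := by omega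
    have hx1k : (x + 1 - k).toNat = s + 1 := by omega
    have hfuel' : fuel = (n - (x+1)).toNat := by omega
    have hklen : k ≤ x + 1 := by omega
    have hx1len : x + 1 ≤ (a.length:Int) := by omega
    -- the element entering and the element leaving the window
    have hd : PySem.List.pyGetD a (x - k) 0 = a[s] :=
      PySem.List.pyGetD_eq_getElem a 0 (by omega) (by omega)
    have hr : PySem.List.pyGetD a x 0 = a[x.toNat] :=
      PySem.List.pyGetD_eq_getElem a 0 (by omega) (by omega)
    set T : List Int := (a.drop (s+1)).take (K-1) with hT
    have hW : (a.drop s).take K = a[s] :: T := by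
      rw [← List.getElem_cons_drop hslt]
      rw [show K = (K-1)+1 by omega, List.take_succ_cons]
    have hW' : (a.drop (s+1)).take K = T ++ [a[x.toNat]] := by
      conv_lhs => rw [show K = (K-1)+1 by omega]
      rw [List.take_add_one, hT]
      congr 1
      rw [List.getElem?_drop]
      rw [show s + 1 + (K-1) = x.toNat by omega]
      rw [List.getElem?_eq_getElem hxlt]
      rfl
    obtain ⟨q1, q2, q3⟩ := innerFoldSpec
      (slideA k (PySem.List.pyGetD a (x - k) 0) (PySem.List.pyGetD a x 0))
      (fun bit v => (v - (if PySem.Int.band ((1:Int) <<< bit) (PySem.List.pyGetD a (x - k) 0) ≠ 0 then 1 else 0))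
                  + (if PySem.Int.band ((1:Int) <<< bit) (PySem.List.pyGetD a x 0) ≠ 0 then 1 else 0)) k
      (slideA_hf k _ _) 12 le_rfl count false hlen
    -- the new counter values are the counts of the shifted window
    have hg : ∀ b, b < 12 →
        (count.getD b 0 - (if PySem.Int.band ((1:Int) <<< b) (PySem.List.pyGetD a (x - k) 0) ≠ 0 then 1 else 0))
          + (if PySem.Int.band ((1:Int) <<< b) (PySem.List.pyGetD a x 0) ≠ 0 then 1 else 0)
          = (wcnt ((a.drop (s+1)).take K) b : Int) := by
      intro b hb
      rw [hd, hr, ind_eq, ind_eq, hcnt b hb, hW, hW', wcnt_cons, wcnt_append]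
      push_cast
      by_cases h1 : (a[s]).testBit b <;> by_cases h2 : (a[x.toNat]).testBit b <;>
        simp [h1, h2]
    -- B's window is the shifted window
    have hslice : PySem.List.slice a (some (x - k + 1)) (some (x - k + 1 + k)) = (a.drop (s+1)).take K := by
      rw [PySem.List.slice_toNat a (by omega) (by omega)]
      rw [show (x - k + 1).toNat = s + 1 by omega]
      rw [show (x - k + 1 + k).toNat = x.toNat + 1 by omega]
      rw [show x.toNat + 1 - (s + 1) = K by omega]
    have hlenW' : (((a.drop (s+1)).take K).length : Int) = k := by
      have : ((a.drop (s+1)).take K).length = K := by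
        rw [List.length_take, List.length_drop]
        omega
      rw [this]; omega
    have hfc := bFullColumn_iff ((a.drop (s+1)).take K) k hk hlenW'
    -- unfold one step of each loop
    rw [show PySem.List.pyRange (x - k + 1) (n - k + 1) 1
          = (x - k + 1) :: PySem.List.pyRange (x - k + 2) (n - k + 1) 1 by
        rw [PySem.List.pyRange_one_cons (by omega), show x - k + 1 + 1 = x - k + 2 by ring]]
    show (if x < n then
        let st := (List.range 12).foldl
          (slideA k (PySem.List.pyGetD a (x - k) 0) (PySem.List.pyGetD a x 0)) (count, false)
        if st.2 = false then "YES" else loopA n k a fuel (x + 1) st.1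
      else "NO")
      = (if bFullColumn (PySem.List.slice a (some (x - k + 1)) (some ((x - k + 1) + k))) k
          then loopB k a (PySem.List.pyRange (x - k + 2) (n - k + 1) 1) else "YES")
    rw [if_pos hxn, hslice]
    set st := (List.range 12).foldl
      (slideA k (PySem.List.pyGetD a (x - k) 0) (PySem.List.pyGetD a x 0)) (count, false) with hst
    show (if st.2 = false then "YES" else loopA n k a fuel (x + 1) st.1)
      = (if bFullColumn (List.take K (List.drop (s+1) a)) k
          then loopB k a (PySem.List.pyRange (x - k + 2) (n - k + 1) 1) else "YES")
    rcases hflag : st.2 with _ | _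
    · -- no fully-set column in the shifted window: both answer "YES"
      rw [if_pos rfl]
      have hnot : ¬ (bFullColumn ((a.drop (s+1)).take K) k = true) := by
        rw [hfc]
        rintro ⟨b, hb, hcb⟩
        have : st.2 = true := q3.mpr (Or.inr ⟨b, hb, by rw [hg b hb]; exact hcb⟩)
        rw [hflag] at this; exact absurd this (by simp)
      rw [if_neg hnot]
    · -- a fully-set column exists: both slide on
      rw [if_neg (by simp)]
      have hcol : bFullColumn ((a.drop (s+1)).take K) k = true := by
        rw [hfc]
        obtain (h | ⟨b, hb, hgb⟩) := q3.mp hflag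
        · exact absurd h (by simp)
        · exact ⟨b, hb, by rw [← hg b hb]; exact hgb⟩
      rw [if_pos hcol]
      have := ih (x + 1) st.1 hklen hx1len hfuel' q1 (by
        intro b hb
        have hq2b := q2 b
        rw [hq2b, if_pos hb, hx1k]
        exact hg b hb)
      rw [show x - k + 2 = x + 1 - k + 1 by ring]
      exact this

theorem rep_getD (b : Nat) : (List.replicate 12 (0:Int)).getD b 0 = 0 := by
  simp only [List.getD, List.getElem?_replicate]
  split_ifs <;> rfl

theorem solution_unfold (n k : Int) (a : List Int) :
    solution n k a =
      (if ((PySem.List.slice a none (some k)).foldl (stepA k)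
            (List.replicate 12 (0:Int), false)).2 = false then "YES"
       else loopA n k a (n - k).toNat k
            ((PySem.List.slice a none (some k)).foldl (stepA k)
              (List.replicate 12 (0:Int), false)).1) := rfl

theorem solution_alt_unfold (n k : Int) (a : List Int) :
    solution_alt n k a =
      (if bFullColumn (PySem.List.slice a none (some k)) k then
        loopB k a (PySem.List.pyRange 1 (n - k + 1) 1)
       else "YES") := rfl

theorem main_eq (n k : Int) (a : List Int)
    (hpre : n ≤ (a.length : Int) ∨ k ≤ 0 ∨ (a.length : Int) < k) :
    solution n k a = solution_alt n k a := by
  rw [solution_unfold, solution_alt_unfold]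
  rcases lt_trichotomy k 0 with hkneg | hk0 | hkpos
  · -- k < 0 : counters stay nonnegative, never reach k; both answer "YES"
    have hflag := firstFold_neg k hkneg (PySem.List.slice a none (some k))
      (List.replicate 12 (0:Int)) (by simp) (fun b => by rw [rep_getD])
    have hbf : bFullColumn (PySem.List.slice a none (some k)) k = false := by
      unfold bFullColumn
      rw [if_pos (Or.inr (by omega))]
    rw [if_pos hflag, hbf]
    rfl
  · -- k = 0 : the first window a[:0] is empty and both answer "YES"
    subst hk0
    have hsl : PySem.List.slice a none (some (0:Int)) = [] := by
      rw [PySem.List.slice_to a le_rfl]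
      rfl
    have hbf : bFullColumn ([] : List Int) 0 = false := by
      unfold bFullColumn
      rw [if_pos (Or.inr le_rfl)]
    rw [hsl, hbf]
    rfl
  · -- 1 ≤ k
    have hk : 1 ≤ k := by omega
    have hsl : PySem.List.slice a none (some k) = a.take k.toNat :=
      PySem.List.slice_to a (by omega)
    rw [hsl]
    rcases le_or_gt k (a.length : Int) with hbig | hsmall
    · -- the first window is complete
      have hwlen : (a.take k.toNat).length = k.toNat := by
        rw [List.length_take]; omega
      have hwk : ((a.take k.toNat).length : Int) = k := by rw [hwlen]; omega
      obtain ⟨f1, f2, f3⟩ := firstFold k hk (a.take k.toNat) (by omega)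
      have hfc := bFullColumn_iff (a.take k.toNat) k hk hwk
      rcases hflag : ((a.take k.toNat).foldl (stepA k) (List.replicate 12 (0:Int), false)).2 with _ | _
      · -- no fully-set column in the first window
        rw [if_pos rfl]
        have hbf : ¬ (bFullColumn (a.take k.toNat) k = true) := by
          rw [hfc]
          rintro hex
          have := f3.mpr hex
          rw [hflag] at this
          exact absurd this (by simp)
        rw [if_neg hbf]
      · -- a fully-set column exists: enter the sliding phase
        rw [if_neg (by simp)]
        rw [if_pos (hfc.mpr (f3.mp hflag))]
        have h00 : (k - k).toNat = 0 := by omega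
        have hn : n ≤ (a.length : Int) := by
          rcases hpre with h | h | h
          · exact h
          · omega
          · omega
        have := loops n k a hk hn (n - k).toNat k
          ((a.take k.toNat).foldl (stepA k) (List.replicate 12 (0:Int), false)).1
          le_rfl hbig rfl f1 (by
            intro b hb
            rw [h00, List.drop_zero]
            exact f2 b hb)
        rw [show k - k + 1 = 1 by ring] at this
        exact this
    · -- the list is shorter than k: the first window is incomplete, both answer "YES"
      have hwlen : (a.take k.toNat).length = a.length := by
        rw [List.length_take]; omega
      obtain ⟨f1, f2, f3⟩ := firstFold k hk (a.take k.toNat) (by omega)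
      have hflag : ((a.take k.toNat).foldl (stepA k) (List.replicate 12 (0:Int), false)).2 = false := by
        rcases hq : ((a.take k.toNat).foldl (stepA k) (List.replicate 12 (0:Int), false)).2 with _ | _
        · rfl
        · exfalso
          obtain ⟨b, hb, hcb⟩ := f3.mp hq
          have := wcnt_le (a.take k.toNat) b
          omega
      have hbf : bFullColumn (a.take k.toNat) k = false := by
        unfold bFullColumn
        rw [if_pos (Or.inl (by simp [PySem.List.len_eq, hwlen]; omega))]
      rw [if_pos hflag, hbf]
      rfl

-- ===== VERDICT (by name: the statement is the Claim_ definition above) =====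
theorem solution_spec : Claim_equal_solution := by
  intro n k a _ hpre
  show solution n k a = solution_alt n k a
  exact main_eq n k a hpre
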